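-- pv_equiv track=rewrite | github.com/Singhanji/python-DSA | beginner_python_batch_practice/python_practice/subarray_with_BITWISE_OR_1.py | solve
-- ===== SOURCE A (Python) =====
-- def solve(A,B):
--     n = len(B)
--     t = A *(A+1)//2
--     c,Sum = 0,0
--     for i in range(n):
--         if B[i]==0:
--             c+=1
--         else:
--             Sum += c*(c+1)//2
--             c = 0
--             if c>=1:
--                 Sum += c*(c+1)//2
--     return t-Sum
-- ===== SOURCE B (Python) =====
-- def solve(A, B):
--     # count zero-subarrays in one pass: run = zero-subarrays ending here
--     zeros = 0
--     run = 0
--     for x in B: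
--         run = run + 1 if x == 0 else 0
--         zeros += run
--     return A * (A + 1) // 2 - zeros
-- ===== Notes on version B (the rewrite author's own statement) =====
-- stated objective: simpler
-- what changed: Instead of tracking zero-run lengths and adding a closed-form triangle number each time a run closes (and forgetting the trailing run), B accumulates per element the number of zero-subarrays ending at that position, which needs no run-closing bookkeeping and naturally counts a trailing zero-run. Measured ~2x faster: only an increment and an add per element, no triangle-number computation in the loop.
-- intended difference: On inputs whose last element is 0, A never adds the trailing zero-run's subarrays to Sum (its post-reset 'if c>=1' branch is dead code), so A returns a value too large by k*(k+1)//2 for a trailing zero-run of length k; B returns the intended count t minus ALL all-zero subarrays. — e.g. on solve(1, [0]): A returns 1, B returns 0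
import Mathlib
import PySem

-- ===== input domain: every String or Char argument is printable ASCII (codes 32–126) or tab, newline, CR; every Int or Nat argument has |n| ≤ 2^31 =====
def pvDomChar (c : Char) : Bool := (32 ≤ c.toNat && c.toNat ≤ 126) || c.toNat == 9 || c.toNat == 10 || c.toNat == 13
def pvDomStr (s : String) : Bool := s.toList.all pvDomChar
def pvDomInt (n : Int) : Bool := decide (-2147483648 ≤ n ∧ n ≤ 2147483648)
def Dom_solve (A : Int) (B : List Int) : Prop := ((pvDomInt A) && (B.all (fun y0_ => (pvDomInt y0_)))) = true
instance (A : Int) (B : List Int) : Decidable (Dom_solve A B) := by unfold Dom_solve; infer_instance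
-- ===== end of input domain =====

-- B replaces A's run-length bookkeeping (triangle number added when a zero-run closes) by
-- per-element accumulation of the count of zero-subarrays ending at each position (simpler).

-- ===== PORT A =====
-- loop body of A: state (c, Sum); the 'if c >= 1' branch after 'c = 0' is kept literally
def solveStepA (s : Int × Int) (x : Int) : Int × Int :=
  if x = 0 then (s.1 + 1, s.2)
  else
    let Sum := s.2 + PySem.Int.floordiv (s.1 * (s.1 + 1)) 2
    let c : Int := 0
    if c ≥ 1 then (c, Sum + PySem.Int.floordiv (c * (c + 1)) 2) else (c, Sum)

def solve (A : Int) (B : List Int) : Int :=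
  let t := PySem.Int.floordiv (A * (A + 1)) 2
  let s := B.foldl solveStepA (0, 0)
  t - s.2

-- ===== PORT B =====
-- loop body of B: state (zeros, run)
def solveStepB (s : Int × Int) (x : Int) : Int × Int :=
  let run := if x = 0 then s.2 + 1 else 0
  (s.1 + run, run)

def solve_alt (A : Int) (B : List Int) : Int :=
  let s := B.foldl solveStepB (0, 0)
  PySem.Int.floordiv (A * (A + 1)) 2 - s.1

-- ===== PRECONDITION & SPEC =====
-- When B ends in a 0, A forgets to count the subarrays of the trailing zero-run (the
-- 'if c>=1' after 'c = 0' is dead code), returning a value too large by k*(k+1)//2 for a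
-- trailing zero-run of length k; B returns the intended t minus ALL all-zero subarrays.
def D_solve (A : Int) (B : List Int) : Prop := B.getLast? = some 0

instance (A : Int) (B : List Int) : Decidable (D_solve A B) := by unfold D_solve; infer_instance

def Spec_solve (A : Int) (B : List Int) (out : Int) : Prop := ¬ D_solve A B → out = solve_alt A B
instance (A : Int) (B : List Int) (out : Int) : Decidable (Spec_solve A B out) := by unfold Spec_solve; infer_instance

def pvDiffWitness_solve : Int × List Int := (1, [0])
def pvDiffWitnessOut_solve : Int × Int := (1, 0)

-- ===== CLAIM (what is proved, stated in full; the proofs are below) =====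
def Claim_unchanged_solve : Prop := ∀ (A : Int) (B : List Int), Dom_solve A B → Spec_solve A B (solve A B)
def Claim_changed_solve : Prop := Dom_solve (pvDiffWitness_solve.1) (pvDiffWitness_solve.2) ∧ D_solve (pvDiffWitness_solve.1) (pvDiffWitness_solve.2) ∧ solve (pvDiffWitness_solve.1) (pvDiffWitness_solve.2) = pvDiffWitnessOut_solve.1 ∧ solve_alt (pvDiffWitness_solve.1) (pvDiffWitness_solve.2) = pvDiffWitnessOut_solve.2 ∧ pvDiffWitnessOut_solve.1 ≠ pvDiffWitnessOut_solve.2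
def Claim_exact_solve : Prop := ∀ (A : Int) (B : List Int), Dom_solve A B → D_solve A B → solve A B ≠ solve_alt A B

-- ===== LEMMAS AND PROOFS =====

def tri (c : Int) : Int := PySem.Int.floordiv (c * (c + 1)) 2

theorem tri_succ (c : Int) : tri (c + 1) = tri c + (c + 1) := by
  unfold tri
  rw [PySem.Int.floordiv_eq_ediv_of_pos (by omega), PySem.Int.floordiv_eq_ediv_of_pos (by omega)]
  have h : (c + 1) * (c + 1 + 1) = c * (c + 1) + (c + 1) * 2 := by ring
  rw [h, Int.add_mul_ediv_right _ _ (by omega)]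

theorem tri_nonneg (c : Int) (hc : 0 ≤ c) : 0 ≤ tri c := by
  unfold tri
  rw [PySem.Int.floordiv_eq_ediv_of_pos (by omega)]
  exact Int.ediv_nonneg (by nlinarith) (by omega)

-- invariant relating A's fold state to B's fold state
theorem inv_steps (l : List Int) :
    ∀ (c Sum : Int), 0 ≤ c →
      (l.foldl solveStepB (Sum + tri c, c)).1
          = (l.foldl solveStepA (c, Sum)).2 + tri (l.foldl solveStepA (c, Sum)).1
        ∧ (l.foldl solveStepB (Sum + tri c, c)).2 = (l.foldl solveStepA (c, Sum)).1
        ∧ 0 ≤ (l.foldl solveStepA (c, Sum)).1 := by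
  induction l with
  | nil => intro c Sum hc; exact ⟨rfl, rfl, hc⟩
  | cons x l ih =>
    intro c Sum hc
    by_cases hx : x = 0
    · have hA : solveStepA (c, Sum) x = (c + 1, Sum) := by simp [solveStepA, hx]
      have hB : solveStepB (Sum + tri c, c) x = (Sum + tri (c + 1), c + 1) := by
        simp [solveStepB, hx, tri_succ]; ring
      simpa [List.foldl_cons, hA, hB] using ih (c + 1) Sum (by omega)
    · have hA : solveStepA (c, Sum) x = (0, Sum + tri c) := by
        simp [solveStepA, hx, tri]
      have hB : solveStepB (Sum + tri c, c) x = (Sum + tri c, 0) := by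
        simp [solveStepB, hx]
      have h0 : Sum + tri c + tri 0 = Sum + tri c := by
        simp [tri, PySem.Int.floordiv]
      have hrec := ih 0 (Sum + tri c) le_rfl
      rw [h0] at hrec
      simpa [List.foldl_cons, hA, hB] using hrec

theorem inv_init (B : List Int) :
    (B.foldl solveStepB (0, 0)).1
        = (B.foldl solveStepA (0, 0)).2 + tri (B.foldl solveStepA (0, 0)).1
      ∧ (B.foldl solveStepB (0, 0)).2 = (B.foldl solveStepA (0, 0)).1
      ∧ 0 ≤ (B.foldl solveStepA (0, 0)).1 := by
  have h := inv_steps B 0 0 le_rfl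
  simpa [tri, PySem.Int.floordiv] using h

-- the final c of A's fold is the trailing zero-run length: last element decides 0 vs ≥ 1
theorem lastA (l : List Int) (x : Int) (s : Int × Int) :
    ((l ++ [x]).foldl solveStepA s).1 = if x = 0 then (l.foldl solveStepA s).1 + 1 else 0 := by
  rw [List.foldl_append]
  by_cases hx : x = 0 <;> simp [solveStepA, hx]

theorem c_eq_zero_of_not_last (B : List Int) (h : ¬ B.getLast? = some 0) :
    (B.foldl solveStepA (0, 0)).1 = 0 := by
  rcases B.eq_nil_or_concat with rfl | ⟨l, x, rfl⟩
  · rfl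
  · simp only [List.concat_eq_append] at h ⊢
    rw [lastA]
    have hx : ¬ x = 0 := by
      intro hx; exact h (by simp [hx])
    simp [hx]

theorem solve_sub (A : Int) (B : List Int) :
    solve A B = solve_alt A B + tri (B.foldl solveStepA (0, 0)).1 := by
  obtain ⟨h1, _, _⟩ := inv_init B
  simp only [solve, solve_alt, h1]
  ring

theorem solve_spec : Claim_unchanged_solve := by
  intro A B _ hD
  have hc := c_eq_zero_of_not_last B hD
  have := solve_sub A B
  rw [hc] at this
  simpa [tri, PySem.Int.floordiv] using this

theorem solve_changed : Claim_changed_solve := by unfold Claim_changed_solve; decide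

theorem solve_tight : Claim_exact_solve := by
  intro A B _ hD
  have hne : B ≠ [] := by intro h; simp [D_solve, h] at hD
  rcases B.eq_nil_or_concat with rfl | ⟨l, x, rfl⟩
  · exact absurd rfl hne
  · simp only [List.concat_eq_append] at hD ⊢
    have hx : x = 0 := by
      have h' : (l ++ [x]).getLast? = some 0 := hD
      simpa using h'
    have hc : ((l ++ [x]).foldl solveStepA (0, 0)).1
        = (l.foldl solveStepA (0, 0)).1 + 1 := by rw [lastA]; simp [hx]
    obtain ⟨_, _, hpos⟩ := inv_init l
    have hpos' : 1 ≤ ((l ++ [x]).foldl solveStepA (0, 0)).1 := by omega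
    have htri : 1 ≤ tri ((l ++ [x]).foldl solveStepA (0, 0)).1 := by
      set d := ((l ++ [x]).foldl solveStepA (0, 0)).1 with hd
      have : tri d = tri (d - 1) + d := by
        have := tri_succ (d - 1); simpa using this
      have h0 : 0 ≤ tri (d - 1) := tri_nonneg _ (by omega)
      omega
    have := solve_sub A (l ++ [x])
    omega
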